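-- pv_equiv track=rewrite | github.com/joy961208/Programmers-Coding-Test | Level 4/[3차] 자동완성.py | solution
-- ===== SOURCE A (Python) =====
-- def solution(words):
--     answer = 0
--     words.sort()
--
--     for i,j in enumerate(words[0]):
--         if i == len(words[1]):
--             answer += 1
--             break
--         if j == words[1][i] :
--             answer += 1
--         else:
--             answer += 1
--             break
--     a = 1
--     while True:
--         c1 = 0
--         c2 = 0
--
--         for i,j in enumerate(words[a]):
--             if i == len(words[a+1]):
--                 c1 +=1
--                 break
--             if j == words[a+1][i]:
--                 c1 += 1
--             else:
--                 c1 += 1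
--                 break
--
--         for i,j in enumerate(words[a]):
--             if i == len(words[a-1]):
--                 c2 +=1
--                 break
--             if j == words[a-1][i]:
--                 c2 += 1
--             else:
--                 c2 += 1
--                 break
--         answer += max(c1,c2)
--         a += 1
--
--         if a == len(words) -1:
--             for i, j in enumerate(words[a]):
--                 if i == len(words[a - 1]):
--                     answer += 1
--                     break
--                 if j == words[a - 1][i]:
--                     answer += 1
--                 else:
--                     answer += 1
--                     break
--             return answer
--     return answer
-- ===== SOURCE B (Python) =====
-- def solution(words):
--     # Trie-as-prefix-counter: count every nonempty prefix of every word once;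
--     # a word is uniquely determined after its shortest prefix seen only once.
--     cnt = {}
--     for w in words:
--         for k in range(1, len(w) + 1):
--             p = w[:k]
--             cnt[p] = cnt.get(p, 0) + 1
--     total = 0
--     for w in words:
--         typed = len(w)
--         for k in range(1, len(w) + 1):
--             if cnt[w[:k]] == 1:
--                 typed = k
--                 break
--         total += typed
--     return total
-- ===== Notes on version B (the rewrite author's own statement) =====
-- stated objective: alternative
-- what changed: A sorts the words and scans each word character-by-character against both sorted neighbours; B never sorts: it builds a dict counting every nonempty prefix of every word (a trie as a counter) and, per word, returns the length of its shortest prefix whose count is 1 (or the full length).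
import Mathlib
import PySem

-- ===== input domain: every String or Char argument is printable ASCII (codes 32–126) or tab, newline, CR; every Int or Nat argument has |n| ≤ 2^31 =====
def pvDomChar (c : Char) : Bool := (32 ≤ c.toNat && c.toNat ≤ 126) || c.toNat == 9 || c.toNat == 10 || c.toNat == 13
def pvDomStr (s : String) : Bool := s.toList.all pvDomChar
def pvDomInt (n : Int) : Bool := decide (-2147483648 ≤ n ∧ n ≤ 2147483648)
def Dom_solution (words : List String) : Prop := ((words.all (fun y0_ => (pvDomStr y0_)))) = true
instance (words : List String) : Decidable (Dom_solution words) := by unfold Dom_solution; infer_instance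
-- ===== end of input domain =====

-- B drops A's sort-and-compare-with-neighbours approach entirely: it builds a dict
-- counting every nonempty prefix of every word (a trie as a counter) and charges each
-- word the length of its shortest prefix counted exactly once (or its full length);
-- objective: alternative.  Note: Python A sorts `words` IN PLACE (B does not mutate);
-- the equivalence proved here is about the RETURN value.

-- ===== PORT A =====
-- the repeated `for i,j in enumerate(w): if i == len(v): +1 break; if j == v[i]: +1 else +1 break`
-- block; iterates over w with running index i into v (i < len v whenever v[i] is read,
-- since i == len v is tested first and i only grows past matches, so v[i]? is exact)
def pvCmp (v : List Char) : Nat → List Char → Int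
  | _, [] => 0
  | i, c :: w =>
    if i = v.length then 1
    else if v[i]? = some c then 1 + pvCmp v (i + 1) w
    else 1

-- the `while True` loop: runs the body at index a, then returns after the final block
-- once a+1 == len(words)-1; fuel only makes the recursion structural (len(words) is
-- always enough under Pre_); out-of-range indexing (impossible under Pre_) yields []
def pvLoopA (s : List (List Char)) : Nat → Nat → Int
  | 0, _ => 0
  | fuel + 1, a =>
    let wa := s.getD a []
    let c1 := pvCmp (s.getD (a + 1) []) 0 wa
    let c2 := pvCmp (s.getD (a - 1) []) 0 wa
    max c1 c2 +
      (if a + 1 = s.length - 1 then pvCmp wa 0 (s.getD (a + 1) [])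
       else pvLoopA s fuel (a + 1))

def solution (words : List String) : Int :=
  let s := (PySem.List.sorted words (fun x => x) false).map String.toList
  pvCmp (s.getD 1 []) 0 (s.getD 0 []) + pvLoopA s s.length 1

-- ===== PORT B =====
-- `for k in range(1, len(w)+1): p = w[:k]; cnt[p] = cnt.get(p, 0) + 1`
-- (strings as List Char; w[:k] with 0 ≤ k is take k)
def bAddWord (d : PySem.Dict (List Char) Int) (w : List Char) : PySem.Dict (List Char) Int :=
  (PySem.List.pyRange 1 ((w.length : Int) + 1) 1).foldl
    (fun d k => d.insert (w.take k.toNat) (d.getD (w.take k.toNat) 0 + 1)) d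

-- `typed = len(w); for k in range(1, len(w)+1): if cnt[w[:k]] == 1: typed = k; break`
-- cnt[w[:k]] is always present (it was counted from w itself), so getD's default is never taken
def bFindAux (cnt : PySem.Dict (List Char) Int) (w : List Char) : Nat → Nat → Int
  | 0, _ => (w.length : Int)
  | left + 1, k => if cnt.getD (w.take k) 0 = 1 then (k : Int) else bFindAux cnt w left (k + 1)

def bFind (cnt : PySem.Dict (List Char) Int) (w : List Char) (k : Nat) : Int :=
  bFindAux cnt w (w.length + 1 - k) k

def solution_alt (words : List String) : Int :=
  let cnt := words.foldl (fun d w => bAddWord d w.toList) PySem.Dict.empty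
  words.foldl (fun t w => t + bFind cnt w.toList 1) 0

-- ===== PRECONDITION & SPEC =====
-- Pre_ excludes only inputs on which A raises: with fewer than 3 words, A's indexing
-- of words[1] / words[a+1] raises IndexError.
def Pre_solution (words : List String) : Prop := 3 ≤ words.length
instance (words : List String) : Decidable (Pre_solution words) := by unfold Pre_solution; infer_instance

def pvWitness_solution : List String := (["go", "gone", "guild"])

def Spec_solution (words : List String) (out : Int) : Prop := out = solution_alt words
instance (words : List String) (out : Int) : Decidable (Spec_solution words out) := by unfold Spec_solution; infer_instance

-- ===== CLAIM (what is proved, stated in full; the proofs are below) =====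
def Claim_equal_solution : Prop := ∀ (words : List String), Dom_solution words → Pre_solution words → Spec_solution words (solution words)

-- ===== LEMMAS AND PROOFS =====

-- longest common prefix, the quantity both programs are secretly about
def pvLcp : List Char → List Char → Int
  | a :: u, b :: v => if a ≠ b then 0 else 1 + pvLcp u v
  | _, _ => 0

theorem pvLcp_nonneg (u v : List Char) : 0 ≤ pvLcp u v := by
  induction u generalizing v with
  | nil => simp [pvLcp]
  | cons a u ih =>
    cases v with
    | nil => simp [pvLcp]
    | cons b v =>
      simp only [pvLcp]
      split
      · omega
      · have := ih v; omega

theorem pvLcp_comm (u v : List Char) : pvLcp u v = pvLcp v u := by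
  induction u generalizing v with
  | nil => cases v <;> simp [pvLcp]
  | cons a u ih =>
    cases v with
    | nil => simp [pvLcp]
    | cons b v =>
      simp only [pvLcp, ne_eq]
      by_cases h : a = b
      · subst h; simp [ih]
      · have h' : ¬ b = a := fun hc => h hc.symm
        simp [h, h']

-- A's comparison block equals min(len w, lcp(w, v from index i) + 1)
theorem pvCmp_eq (v w : List Char) :
    ∀ i : Nat, pvCmp v i w = min (w.length : Int) (pvLcp w (v.drop i) + 1) := by
  induction w with
  | nil =>
    intro i
    have h0 : pvLcp [] (v.drop i) = 0 := rfl
    simp only [pvCmp, h0, List.length_nil]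
    omega
  | cons c w ih =>
    intro i
    by_cases hi : i = v.length
    · subst hi
      rw [List.drop_length]
      have h0 : pvLcp (c :: w) [] = 0 := rfl
      simp only [pvCmp, h0, List.length_cons]
      push_cast
      omega
    · by_cases hlt : i < v.length
      · have hdrop : v.drop i = v[i] :: v.drop (i + 1) := List.drop_eq_getElem_cons hlt
        have hget : v[i]? = some v[i] := List.getElem?_eq_getElem hlt
        simp only [pvCmp]
        rw [if_neg hi, hget, hdrop]
        by_cases hc : v[i] = c
        · subst hc
          rw [if_pos rfl, ih (i + 1)]
          have h1 : pvLcp (v[i] :: w) (v[i] :: v.drop (i + 1)) = 1 + pvLcp w (v.drop (i + 1)) := by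
            simp [pvLcp]
          rw [h1]
          have := pvLcp_nonneg w (v.drop (i + 1))
          simp only [List.length_cons]
          push_cast
          omega
        · have hne : c ≠ v[i] := fun h => hc h.symm
          rw [if_neg (by simp [hc])]
          have h1 : pvLcp (c :: w) (v[i] :: v.drop (i + 1)) = 0 := by
            simp [pvLcp, hne]
          rw [h1]
          simp only [List.length_cons]
          push_cast
          omega
      · simp only [pvCmp]
        rw [if_neg hi, if_neg (by rw [List.getElem?_eq_none (by omega)]; simp)]
        rw [List.drop_eq_nil_of_le (by omega)]
        have h0 : pvLcp (c :: w) [] = 0 := rfl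
        rw [h0]
        simp only [List.length_cons]
        push_cast
        omega

-- the "middle" specification of A's loop: contribution of the words after the first
-- one, given the previous word p
def msum : List Char → List (List Char) → Int
  | p, [x] => min (x.length : Int) (pvLcp x p + 1)
  | p, x :: y :: t =>
      max (min (x.length : Int) (pvLcp x y + 1)) (min (x.length : Int) (pvLcp x p + 1)) +
        msum x (y :: t)
  | _, [] => 0

theorem pvLoopA_eq (s : List (List Char)) :
    ∀ (fuel a : Nat), 1 ≤ a → a + 2 ≤ s.length → s.length ≤ a + fuel →
      pvLoopA s fuel a = msum (s.getD (a - 1) []) (s.drop a) := by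
  intro fuel
  induction fuel with
  | zero => intro a h1 h2 h3; omega
  | succ f ih =>
    intro a h1 h2 h3
    have ha : a < s.length := by omega
    have ha1 : a + 1 < s.length := by omega
    have hga : s.getD a [] = s[a] := List.getD_eq_getElem s [] ha
    have hga1 : s.getD (a + 1) [] = s[a + 1] := List.getD_eq_getElem s [] ha1
    have hdrop : s.drop a = s[a] :: s.drop (a + 1) := List.drop_eq_getElem_cons ha
    have hdrop1 : s.drop (a + 1) = s[a + 1] :: s.drop (a + 2) := List.drop_eq_getElem_cons ha1
    simp only [pvLoopA, hga, hga1]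
    by_cases hend : a + 1 = s.length - 1
    · have hde : s.drop (a + 2) = [] := List.drop_eq_nil_of_le (by omega)
      rw [if_pos hend, hdrop, hdrop1, hde]
      simp only [msum, pvCmp_eq, List.drop_zero]
    · rw [if_neg hend, ih (a + 1) (by omega) (by omega) (by omega)]
      rw [hdrop, hdrop1]
      simp only [msum, Nat.add_sub_cancel, hga, pvCmp_eq, List.drop_zero]

-- ---- order facts on List Char (the order Python's sort of strings induces) ----

theorem le_nil_eq (s : List Char) (h : s ≤ ([] : List Char)) : s = [] := by
  rcases h with h | h
  · exact h
  · cases h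

theorem le_cons_destruct (a b : Char) (s t : List Char) (h : (a :: s) ≤ (b :: t)) :
    a < b ∨ (a = b ∧ s ≤ t) := by
  rcases h with h | h
  · injection h with h1 h2; subst h1; subst h2; right; exact ⟨rfl, le_refl _⟩
  · rcases List.cons_lex_cons_iff.mp h with h | ⟨h1, h2⟩
    · left; exact h
    · right; exact ⟨h1, Or.inr h2⟩

-- lcp of the two extremes of a ≤-chain is at most the lcp of either adjacent pair
theorem pvLcp_mono (a b c : List Char) (h1 : a ≤ b) (h2 : b ≤ c) :
    pvLcp a c ≤ pvLcp a b ∧ pvLcp a c ≤ pvLcp b c := by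
  induction a generalizing b c with
  | nil =>
    constructor
    · simp [pvLcp]
    · have h0 : pvLcp [] c = 0 := by cases c <;> rfl
      rw [h0]; exact pvLcp_nonneg b c
  | cons x a' ih =>
    cases c with
    | nil =>
      have hb : b = [] := le_nil_eq b h2
      subst hb
      have ha : (x :: a') = [] := le_nil_eq _ h1
      cases ha
    | cons y c' =>
      cases b with
      | nil =>
        have ha : (x :: a') = [] := le_nil_eq _ h1
        cases ha
      | cons z b' =>
        by_cases hxy : x = y
        · rcases le_cons_destruct _ _ _ _ h1 with hlt | ⟨heq, hle⟩
          · rcases le_cons_destruct _ _ _ _ h2 with hlt2 | ⟨heq2, _⟩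
            · have : x < y := lt_trans hlt hlt2
              rw [hxy] at this; exact absurd this (lt_irrefl y)
            · rw [heq2] at hlt; rw [hxy] at hlt; exact absurd hlt (lt_irrefl y)
          · rcases le_cons_destruct _ _ _ _ h2 with hlt2 | ⟨heq2, hle2⟩
            · rw [← heq] at hlt2; rw [hxy] at hlt2; exact absurd hlt2 (lt_irrefl y)
            · obtain ⟨ih1, ih2⟩ := ih b' c' hle hle2
              have e1 : pvLcp (x :: a') (y :: c') = 1 + pvLcp a' c' := by
                simp [pvLcp, hxy]
              have e2 : pvLcp (x :: a') (z :: b') = 1 + pvLcp a' b' := by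
                simp [pvLcp, heq]
              have e3 : pvLcp (z :: b') (y :: c') = 1 + pvLcp b' c' := by
                simp [pvLcp, heq2]
              rw [e1, e2, e3]
              omega
        · have h0 : pvLcp (x :: a') (y :: c') = 0 := by simp [pvLcp, hxy]
          rw [h0]
          exact ⟨pvLcp_nonneg _ _, pvLcp_nonneg _ _⟩

-- within a ≤-sorted list every element is ≤ the last and ≥ the head
theorem mem_le_getLast (u : List (List Char)) (h : u.Pairwise (· ≤ ·)) (v : List Char)
    (hv : v ∈ u) (hne : u ≠ []) : v ≤ u.getLast hne := by
  induction u with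
  | nil => cases hv
  | cons x t ih =>
    cases t with
    | nil =>
      simp only [List.mem_singleton] at hv
      subst hv; exact le_refl _
    | cons y t' =>
      rw [List.getLast_cons (by simp)]
      rcases List.mem_cons.mp hv with hv | hv
      · subst hv
        exact List.rel_of_pairwise_cons h (List.getLast_mem (by simp))
      · exact ih h.of_cons hv (by simp)

theorem head_le_mem (r : List (List Char)) (h : r.Pairwise (· ≤ ·)) (v : List Char)
    (hv : v ∈ r) (hne : r ≠ []) : r.head hne ≤ v := by
  cases r with
  | nil => cases hv
  | cons x t =>
    simp only [List.head_cons]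
    rcases List.mem_cons.mp hv with hv | hv
    · subst hv; exact le_refl _
    · exact List.rel_of_pairwise_cons h hv

-- x.take k is a prefix of v exactly when lcp(x,v) ≥ k  (for k ≤ len x)
theorem prefix_iff_lcp (x : List Char) :
    ∀ (k : Nat) (v : List Char), k ≤ x.length → ((x.take k <+: v) ↔ (k : Int) ≤ pvLcp x v) := by
  induction x with
  | nil =>
    intro k v hk
    have hk0 : k = 0 := by simpa using hk
    subst hk0
    cases v <;> simp [pvLcp]
  | cons a x' ih =>
    intro k v hk
    cases k with
    | zero => simpa using pvLcp_nonneg (a :: x') v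
    | succ k' =>
      cases v with
      | nil =>
        have h0 : pvLcp (a :: x') [] = 0 := rfl
        simp only [h0, List.take_succ_cons]
        constructor
        · intro h; exact absurd h (by simp)
        · intro h; exfalso; omega
      | cons b v' =>
        simp only [List.take_succ_cons, List.cons_prefix_cons, pvLcp, ne_eq]
        by_cases hab : a = b
        · subst hab
          rw [if_neg (show ¬ ¬ (a = a) by simp)]
          simp only [true_and]
          rw [ih k' v' (by simpa using hk)]
          have := pvLcp_nonneg x' v'
          constructor <;> intro h <;> omega
        · rw [if_pos hab]
          simp only [hab, false_and]
          constructor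
          · intro h; exact h.elim
          · intro h; exfalso; omega

-- neighbour lcp (0 when there is no neighbour)
def nb (x : List Char) : Option (List Char) → Int
  | none => 0
  | some p => pvLcp x p

theorem nb_nonneg (x : List Char) (o : Option (List Char)) : 0 ≤ nb x o := by
  cases o with
  | none => simp [nb]
  | some p => exact pvLcp_nonneg x p

-- the crux: in a sorted list u ++ x :: r, the prefix x[:k] occurs exactly once
-- iff k exceeds both neighbour lcps
theorem crux (u : List (List Char)) (x : List Char) (r : List (List Char))
    (hp : (u ++ x :: r).Pairwise (· ≤ ·))
    (k : Nat) (hk1 : 1 ≤ k) (hk2 : k ≤ x.length) :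
    ((u ++ x :: r).countP (fun v => decide (x.take k <+: v)) = 1) ↔
      (nb x u.getLast? < (k : Int) ∧ nb x r.head? < (k : Int)) := by
  rw [List.pairwise_append] at hp
  obtain ⟨hpu, hpxr, hcross⟩ := hp
  have hpr : r.Pairwise (· ≤ ·) := hpxr.of_cons
  have hxr : ∀ v ∈ r, x ≤ v := fun v hv => List.rel_of_pairwise_cons hpxr hv
  have hxk : (decide (x.take k <+: x)) = true := by simp [List.take_prefix]
  have hsplit : (u ++ x :: r).countP (fun v => decide (x.take k <+: v))
      = u.countP (fun v => decide (x.take k <+: v)) + (1 + r.countP (fun v => decide (x.take k <+: v))) := by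
    rw [List.countP_append, List.countP_cons]
    simp only [hxk, if_true]
    omega
  have hu : (u.countP (fun v => decide (x.take k <+: v)) = 0) ↔ nb x u.getLast? < (k : Int) := by
    cases hu0 : u with
    | nil => simp only [List.countP_nil, nb]; simp; omega
    | cons a u' =>
      subst hu0
      have hne : (a :: u') ≠ [] := by simp
      rw [List.getLast?_eq_some_getLast hne]
      simp only [nb]
      rw [List.countP_eq_zero]
      constructor
      · intro h
        have := h _ (List.getLast_mem hne)
        by_contra hc
        rw [not_lt] at hc
        exact this (by simpa using (prefix_iff_lcp x k _ hk2).mpr hc)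
      · intro h v hv
        have h1 : v ≤ (a :: u').getLast hne := mem_le_getLast _ hpu v hv hne
        have h2 : (a :: u').getLast hne ≤ x := hcross _ (List.getLast_mem hne) x (by simp)
        have hm := (pvLcp_mono v ((a :: u').getLast hne) x h1 h2).2
        have hcm1 : pvLcp v x = pvLcp x v := pvLcp_comm v x
        have hcm2 : pvLcp ((a :: u').getLast hne) x = pvLcp x ((a :: u').getLast hne) :=
          pvLcp_comm _ x
        simp only [decide_eq_true_eq]
        intro hpre
        have hkv := (prefix_iff_lcp x k v hk2).mp hpre
        omega
  have hr : (r.countP (fun v => decide (x.take k <+: v)) = 0) ↔ nb x r.head? < (k : Int) := by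
    cases hr0 : r with
    | nil => simp only [List.countP_nil, nb]; simp; omega
    | cons a r' =>
      subst hr0
      have hne : (a :: r') ≠ [] := by simp
      rw [List.head?_eq_some_head hne]
      simp only [nb]
      rw [List.countP_eq_zero]
      constructor
      · intro h
        have := h _ (List.head_mem hne)
        by_contra hc
        rw [not_lt] at hc
        exact this (by simpa using (prefix_iff_lcp x k _ hk2).mpr hc)
      · intro h v hv
        have h1 : (a :: r').head hne ≤ v := head_le_mem _ hpr v hv hne
        have h2 : x ≤ (a :: r').head hne := hxr _ (List.head_mem hne)
        have hm := (pvLcp_mono x ((a :: r').head hne) v h2 h1).1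
        simp only [decide_eq_true_eq]
        intro hpre
        have := (prefix_iff_lcp x k v hk2).mp hpre
        omega
  rw [hsplit]
  constructor
  · intro h
    have hu0 : u.countP (fun v => decide (x.take k <+: v)) = 0 := by omega
    have hr0 : r.countP (fun v => decide (x.take k <+: v)) = 0 := by omega
    exact ⟨hu.mp hu0, hr.mp hr0⟩
  · intro ⟨h1, h2⟩
    have h3 := hu.mpr h1
    have h4 := hr.mpr h2
    omega

-- bFind returns min(len w, m+1) whenever the counter's answers are governed by m
theorem bFind_spec (cnt : PySem.Dict (List Char) Int) (w : List Char) (m : Int) (hm : 0 ≤ m)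
    (H : ∀ k : Nat, 1 ≤ k → k ≤ w.length → ((cnt.getD (w.take k) 0 = 1) ↔ m < (k : Int))) :
    ∀ k : Nat, 1 ≤ k → (k : Int) ≤ m + 1 → bFind cnt w k = min (w.length : Int) (m + 1) := by
  suffices H2 : ∀ (n k : Nat), w.length + 1 - k = n → 1 ≤ k → (k : Int) ≤ m + 1 →
      bFindAux cnt w n k = min (w.length : Int) (m + 1) by
    intro k hk1 hk2; exact H2 _ k rfl hk1 hk2
  intro n
  induction n with
  | zero =>
    intro k hn hk1 hk2
    have hk : (w.length : Int) < k := by omega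
    rw [bFindAux]
    omega
  | succ n ih =>
    intro k hn hk1 hk2
    have hk : k ≤ w.length := by omega
    rw [bFindAux]
    by_cases hc : cnt.getD (w.take k) 0 = 1
    · rw [if_pos hc]
      have := (H k hk1 hk).mp hc
      omega
    · rw [if_neg hc]
      have hmk : ¬ m < (k : Int) := fun h => hc ((H k hk1 hk).mpr h)
      exact ih (k + 1) (by omega) (by omega) (by push_cast; omega)

-- ---- the counter dict really counts prefix occurrences ----

theorem getD_fold_ne (w p : List Char) (d : PySem.Dict (List Char) Int) (l : List Int)
    (hne : ∀ k ∈ l, w.take k.toNat ≠ p) :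
    (l.foldl (fun d k => d.insert (w.take k.toNat) (d.getD (w.take k.toNat) 0 + 1)) d).getD p 0
      = d.getD p 0 := by
  induction l generalizing d with
  | nil => rfl
  | cons k l ih =>
    rw [List.foldl_cons, ih _ (fun j hj => hne j (by simp [hj]))]
    exact PySem.Dict.getD_insert_of_ne _ _ _ (fun h => hne k (by simp) h.symm)

theorem getD_bAddWord (d : PySem.Dict (List Char) Int) (w p : List Char) (hp : p ≠ []) :
    (bAddWord d w).getD p 0 = d.getD p 0 + (if p <+: w then 1 else 0) := by
  unfold bAddWord
  by_cases hpre : p <+: w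
  · rw [if_pos hpre]
    have hlen : p.length ≤ w.length := hpre.length_le
    have hlen1 : 1 ≤ p.length := List.length_pos_iff.mpr hp
    have hptake : w.take p.length = p := (List.prefix_iff_eq_take.mp hpre).symm
    have hmid : PySem.List.pyRange (p.length : Int) ((w.length : Int) + 1) 1
        = (p.length : Int) :: PySem.List.pyRange ((p.length : Int) + 1) ((w.length : Int) + 1) 1 :=
      PySem.List.pyRange_one_cons (by push_cast; omega)
    have hsplit : PySem.List.pyRange 1 ((w.length : Int) + 1) 1
        = PySem.List.pyRange 1 (p.length : Int) 1
          ++ (p.length : Int) :: PySem.List.pyRange ((p.length : Int) + 1) ((w.length : Int) + 1) 1 := by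
      rw [PySem.List.pyRange_one_append 1 (p.length : Int) ((w.length : Int) + 1)
            (by exact_mod_cast hlen1) (by push_cast; omega), hmid]
    rw [hsplit, List.foldl_append, List.foldl_cons]
    rw [getD_fold_ne w p _ _ (by
      intro k hk
      rw [PySem.List.mem_pyRange_one] at hk
      intro heq
      have := congrArg List.length heq
      simp only [List.length_take] at this
      omega)]
    have htn : ((p.length : Int)).toNat = p.length := by simp
    rw [htn, hptake, PySem.Dict.getD_insert_self]
    rw [getD_fold_ne w p d _ (by
      intro k hk
      rw [PySem.List.mem_pyRange_one] at hk
      intro heq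
      have := congrArg List.length heq
      simp only [List.length_take] at this
      omega)]
  · rw [if_neg hpre, add_zero]
    exact getD_fold_ne w p d _ (fun k _ heq => hpre (heq ▸ List.take_prefix _ _))

theorem getD_cnt_gen (ws : List String) (p : List Char) (hp : p ≠ []) :
    ∀ d : PySem.Dict (List Char) Int,
      (ws.foldl (fun d w => bAddWord d w.toList) d).getD p 0
        = d.getD p 0 + ((ws.map String.toList).countP (fun v => decide (p <+: v)) : Int) := by
  induction ws with
  | nil => intro d; simp
  | cons w ws ih =>
    intro d
    rw [List.foldl_cons, ih, getD_bAddWord _ _ _ hp, List.map_cons, List.countP_cons]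
    by_cases hc : p <+: w.toList <;> simp [hc] <;> push_cast <;> omega

theorem getD_cnt (words : List String) (p : List Char) (hp : p ≠ []) :
    (words.foldl (fun d w => bAddWord d w.toList) PySem.Dict.empty).getD p 0
      = ((words.map String.toList).countP (fun v => decide (p <+: v)) : Int) := by
  rw [getD_cnt_gen words p hp PySem.Dict.empty]
  simp

-- ---- per-word value of B, read off the sorted decomposition ----

theorem perElem (words : List String) (u : List (List Char)) (x : List Char)
    (r : List (List Char))
    (hs : (PySem.List.sorted words (fun y => y) false).map String.toList = u ++ x :: r) :
    bFind (words.foldl (fun d w => bAddWord d w.toList) PySem.Dict.empty) x 1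
      = min (x.length : Int) (1 + max (nb x u.getLast?) (nb x r.head?)) := by
  have hm0 : 0 ≤ max (nb x u.getLast?) (nb x r.head?) :=
    le_trans (nb_nonneg x u.getLast?) (le_max_left _ _)
  have hperm : ((PySem.List.sorted words (fun y => y) false).map String.toList).Perm
      (words.map String.toList) :=
    (PySem.List.sorted_perm words (fun y => y) false).map String.toList
  have hpair : (u ++ x :: r).Pairwise (· ≤ ·) := by
    rw [← hs]
    exact (PySem.List.sorted_pairwise words (fun y => y)).map String.toList
      (fun {a b} h => String.le_iff_toList_le.mp h)
  have H : ∀ k : Nat, 1 ≤ k → k ≤ x.length →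
      (((words.foldl (fun d w => bAddWord d w.toList) PySem.Dict.empty).getD (x.take k) 0 = 1)
        ↔ max (nb x u.getLast?) (nb x r.head?) < (k : Int)) := by
    intro k hk1 hk2
    have hx : x ≠ [] := by
      intro h; subst h; simp at hk2; omega
    have hpne : x.take k ≠ [] := by
      rw [Ne, List.take_eq_nil_iff]
      push_neg
      exact ⟨by omega, hx⟩
    rw [getD_cnt words _ hpne]
    have hcnt : (words.map String.toList).countP (fun v => decide (x.take k <+: v))
        = (u ++ x :: r).countP (fun v => decide (x.take k <+: v)) := by
      rw [← hs]
      exact (List.Perm.countP_congr hperm.symm (fun y _ => rfl))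
    rw [hcnt, Nat.cast_eq_one, crux u x r hpair k hk1 hk2]
    exact (max_lt_iff).symm
  have hb := bFind_spec _ x (max (nb x u.getLast?) (nb x r.head?)) hm0 H 1 (le_refl 1) (by omega)
  rw [hb]
  omega

-- ---- A's loop sum equals B's per-word values, summed along the sorted list ----

theorem sumEq (words : List String) :
    ∀ (r : List (List Char)) (p x : List Char) (u : List (List Char)),
      (PySem.List.sorted words (fun y => y) false).map String.toList = u ++ p :: x :: r →
      msum p (x :: r)
        = ((x :: r).map (fun w =>
            bFind (words.foldl (fun d w => bAddWord d w.toList) PySem.Dict.empty) w 1)).sum := by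
  intro r
  induction r with
  | nil =>
    intro p x u hs
    have hpe := perElem words (u ++ [p]) x [] (hs.trans (by simp))
    simp only [List.getLast?_concat, List.head?_nil, nb] at hpe
    simp only [List.map_cons, List.map_nil, List.sum_cons, List.sum_nil]
    rw [hpe]
    have := pvLcp_nonneg x p
    simp only [msum]
    omega
  | cons y t ih =>
    intro p x u hs
    have hs' : (PySem.List.sorted words (fun y => y) false).map String.toList
        = (u ++ [p]) ++ x :: y :: t := hs.trans (by simp)
    have hpe := perElem words (u ++ [p]) x (y :: t) hs'
    simp only [List.getLast?_concat, List.head?_cons, nb] at hpe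
    have hih := ih x y (u ++ [p]) hs'
    rw [show msum p (x :: y :: t)
        = max (min (x.length : Int) (pvLcp x y + 1)) (min (x.length : Int) (pvLcp x p + 1))
            + msum x (y :: t) from rfl]
    rw [hih]
    simp only [List.map_cons, List.sum_cons]
    rw [hpe]
    have h1 := pvLcp_nonneg x p
    have h2 := pvLcp_nonneg x y
    omega

-- ===== VERDICT (by name: the statement is the Claim_ definition above) =====
theorem solution_spec : Claim_equal_solution := by
  intro words _ hpre
  unfold Pre_solution at hpre
  unfold Spec_solution solution solution_alt
  have h3 : 3 ≤ ((PySem.List.sorted words (fun x => x) false).map String.toList).length := by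
    rw [List.length_map, PySem.List.length_sorted]; exact hpre
  obtain ⟨x, y, z, t, hm⟩ : ∃ x y z t,
      (PySem.List.sorted words (fun x => x) false).map String.toList = x :: y :: z :: t := by
    generalize (PySem.List.sorted words (fun x => x) false).map String.toList = s at h3
    rcases s with _ | ⟨x, _ | ⟨y, _ | ⟨z, t⟩⟩⟩
    · simp at h3
    · simp at h3
    · simp at h3
    · exact ⟨x, y, z, t, rfl⟩
  simp only [hm]
  rw [show (x :: y :: z :: t : List (List Char)).getD 1 [] = y from rfl,
      show (x :: y :: z :: t : List (List Char)).getD 0 [] = x from rfl]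
  have hloop := pvLoopA_eq (x :: y :: z :: t) (x :: y :: z :: t).length 1
    (by omega) (by simp only [List.length_cons]; omega) (by omega)
  simp only [Nat.sub_self, List.getD_cons_zero, List.drop_one, List.tail_cons] at hloop
  rw [hloop, pvCmp_eq y x 0, List.drop_zero]
  have h0 := perElem words [] x (y :: z :: t) (by simpa using hm)
  simp only [List.getLast?_nil, List.head?_cons, nb] at h0
  have hsum := sumEq words (z :: t) x y [] (by simpa using hm)
  have halt : words.foldl
        (fun t w => t + bFind (words.foldl (fun d w => bAddWord d w.toList) PySem.Dict.empty) w.toList 1) 0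
      = ((words.map String.toList).map (fun w =>
          bFind (words.foldl (fun d w => bAddWord d w.toList) PySem.Dict.empty) w 1)).sum := by
    rw [PySem.List.foldl_add, List.map_map]
    simp only [Function.comp_def, zero_add]
  rw [halt]
  have hperm : (((PySem.List.sorted words (fun y => y) false).map String.toList).map (fun w =>
          bFind (words.foldl (fun d w => bAddWord d w.toList) PySem.Dict.empty) w 1)).Perm
      ((words.map String.toList).map (fun w =>
          bFind (words.foldl (fun d w => bAddWord d w.toList) PySem.Dict.empty) w 1)) :=
    ((PySem.List.sorted_perm words (fun y => y) false).map String.toList).map _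
  rw [← hperm.sum_eq, hm, List.map_cons, List.sum_cons, ← hsum, h0]
  have h1 := pvLcp_nonneg x y
  omega
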